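-- pv_equiv track=rewrite | github.com/Adversarr/LearningSparsePreconditioner4GPU | misc/plot_scalability.py | reinterprete
-- ===== SOURCE A (Python) =====
-- def reinterprete(method):
--     mapped = {
--         'neural-cpu': 'Ours+CPU',
--         'neural-cuda': 'Ours+CUDA',
--         'ainv-cpu': "AINV+CPU",
--         'ainv-cuda': "AINV+CUDA",
--         'ic-cpu': "IC+CPU",
--         'ic-cuda': "IC+CUDA",
--         'diagonal-cpu': "Diag+CPU",
--         'diagonal-cuda': "Diag+CUDA",
--         'none-cpu': "None+CPU",
--         'none-cuda': "None+CUDA",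
--     }
--     if not isinstance(method, str):
--         output = [mapped.get(m, m) for m in method]
--         return output
--     return mapped.get(method, method)
-- ===== SOURCE B (Python) =====
-- def reinterprete(method):
--     algo = {'neural': 'Ours', 'ainv': 'AINV', 'ic': 'IC',
--             'diagonal': 'Diag', 'none': 'None'}
--     dev = {'cpu': 'CPU', 'cuda': 'CUDA'}
--
--     def label(m):
--         a, sep, d = m.rpartition('-')
--         if sep and a in algo and d in dev:
--             return algo[a] + '+' + dev[d]
--         return m
--
--     if not isinstance(method, str):
--         return [label(m) for m in method]
--     return label(method)
-- ===== Notes on version B (the rewrite author's own statement) =====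
-- stated objective: idiomatic
-- what changed: Replaces the flat 10-entry product dict with two component maps (algorithm, device) and a parse-and-compose helper that splits each name at its last dash, falling back to the original string when either part is unrecognised.
import Mathlib
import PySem

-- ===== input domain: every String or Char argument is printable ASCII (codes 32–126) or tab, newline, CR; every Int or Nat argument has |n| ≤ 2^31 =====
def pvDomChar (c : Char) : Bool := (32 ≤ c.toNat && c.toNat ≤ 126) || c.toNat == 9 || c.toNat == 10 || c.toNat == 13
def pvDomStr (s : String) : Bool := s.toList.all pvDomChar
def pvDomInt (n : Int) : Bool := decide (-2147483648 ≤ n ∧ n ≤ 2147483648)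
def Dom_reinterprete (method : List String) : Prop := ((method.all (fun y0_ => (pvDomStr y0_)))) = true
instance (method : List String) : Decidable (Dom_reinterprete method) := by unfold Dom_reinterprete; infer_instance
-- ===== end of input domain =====

-- B replaces A's flat 10-entry product dict with two component maps (algorithm, device)
-- and a parse-and-compose helper splitting at the last dash; objective: more idiomatic.


-- ===== PORT A =====
def pvMappedA : PySem.Dict String String := PySem.Dict.ofList
  [ ("neural-cpu", "Ours+CPU"), ("neural-cuda", "Ours+CUDA")
  , ("ainv-cpu", "AINV+CPU"), ("ainv-cuda", "AINV+CUDA")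
  , ("ic-cpu", "IC+CPU"), ("ic-cuda", "IC+CUDA")
  , ("diagonal-cpu", "Diag+CPU"), ("diagonal-cuda", "Diag+CUDA")
  , ("none-cpu", "None+CPU"), ("none-cuda", "None+CUDA") ]

-- A on a list argument: [mapped.get(m, m) for m in method]
def reinterprete (method : List String) : List String :=
  method.map (fun m => pvMappedA.getD m m)

-- ===== PORT B =====
def pvAlgoMap : PySem.Dict String String := PySem.Dict.ofList
  [ ("neural", "Ours"), ("ainv", "AINV"), ("ic", "IC"), ("diagonal", "Diag"), ("none", "None") ]

def pvDevMap : PySem.Dict String String := PySem.Dict.ofList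
  [ ("cpu", "CPU"), ("cuda", "CUDA") ]

-- hand port of m.rpartition('-') as B's label uses it: some (before, after) at the LAST
-- '-' when one exists, none when there is no '-' (empty sep => fallback); exact there.
def pvRPartDash : List Char → Option (List Char × List Char)
  | [] => none
  | c :: cs =>
    match pvRPartDash cs with
    | some (p, s) => some (c :: p, s)
    | none => if c = '-' then some ([], cs) else none

def pvLabel (m : String) : String :=
  match pvRPartDash m.toList with
  | none => m
  | some (p, s) =>
    match pvAlgoMap.get? (String.ofList p), pvDevMap.get? (String.ofList s) with
    | some a, some d => String.ofList (a.toList ++ '+' :: d.toList)  -- algo[a] + '+' + dev[d]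
    | _, _ => m

def reinterprete_alt (method : List String) : List String :=
  method.map pvLabel

-- ===== PRECONDITION & SPEC =====
def Spec_reinterprete (method : List String) (out : List String) : Prop := out = reinterprete_alt method
instance (method : List String) (out : List String) : Decidable (Spec_reinterprete method out) := by unfold Spec_reinterprete; infer_instance

-- ===== CLAIM (what is proved, stated in full; the proofs are below) =====
def Claim_equal_reinterprete : Prop := ∀ (method : List String), Dom_reinterprete method → Spec_reinterprete method (reinterprete method)

-- ===== LEMMAS AND PROOFS =====

-- pvRPartDash splits its input at a '-'.
theorem pvRPartDash_eq (cs p s : List Char) (h : pvRPartDash cs = some (p, s)) :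
    cs = p ++ '-' :: s := by
  induction cs generalizing p s with
  | nil => simp [pvRPartDash] at h
  | cons c cs ih =>
    simp only [pvRPartDash] at h
    cases hrec : pvRPartDash cs with
    | some ps =>
      obtain ⟨p', s'⟩ := ps
      rw [hrec] at h
      simp only [Option.some.injEq, Prod.mk.injEq] at h
      obtain ⟨h1', h2'⟩ := h
      subst h2'
      rw [← h1', List.cons_append]
      exact congrArg (c :: ·) (ih p' _ hrec)
    | none =>
      rw [hrec] at h
      by_cases hc : c = '-'
      · simp [hc] at h
        obtain ⟨h1', h2'⟩ := h
        subst h1'; subst h2'; simp [hc]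
      · simp [hc] at h

-- a successful algorithm-map lookup pins the key to one of the five names
theorem pvAlgo_key (q a : String) (h : pvAlgoMap.get? q = some a) :
    q = "neural" ∨ q = "ainv" ∨ q = "ic" ∨ q = "diagonal" ∨ q = "none" := by
  by_cases e1 : q = "neural"; · exact Or.inl e1
  by_cases e2 : q = "ainv"; · exact Or.inr (Or.inl e2)
  by_cases e3 : q = "ic"; · exact Or.inr (Or.inr (Or.inl e3))
  by_cases e4 : q = "diagonal"; · exact Or.inr (Or.inr (Or.inr (Or.inl e4)))
  by_cases e5 : q = "none"; · exact Or.inr (Or.inr (Or.inr (Or.inr e5)))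
  exfalso
  have hi : pvAlgoMap.items =
      [("neural", "Ours"), ("ainv", "AINV"), ("ic", "IC"), ("diagonal", "Diag"), ("none", "None")] := by decide
  simp [PySem.Dict.get?, hi, List.find?, beq_eq_false_iff_ne.mpr (Ne.symm e1),
    beq_eq_false_iff_ne.mpr (Ne.symm e2), beq_eq_false_iff_ne.mpr (Ne.symm e3),
    beq_eq_false_iff_ne.mpr (Ne.symm e4), beq_eq_false_iff_ne.mpr (Ne.symm e5)] at h

-- a successful device-map lookup pins the key to one of the two devices
theorem pvDev_key (q d : String) (h : pvDevMap.get? q = some d) :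
    q = "cpu" ∨ q = "cuda" := by
  by_cases e1 : q = "cpu"; · exact Or.inl e1
  by_cases e2 : q = "cuda"; · exact Or.inr e2
  exfalso
  have hi : pvDevMap.items = [("cpu", "CPU"), ("cuda", "CUDA")] := by decide
  simp [PySem.Dict.get?, hi, List.find?, beq_eq_false_iff_ne.mpr (Ne.symm e1),
    beq_eq_false_iff_ne.mpr (Ne.symm e2)] at h

-- B's helper computes exactly A's flat-dict lookup, on every string.
theorem pvLabel_eq (m : String) : pvMappedA.getD m m = pvLabel m := by
  by_cases hk : m ∈ ["neural-cpu", "neural-cuda", "ainv-cpu", "ainv-cuda", "ic-cpu",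
      "ic-cuda", "diagonal-cpu", "diagonal-cuda", "none-cpu", "none-cuda"]
  · fin_cases hk <;> decide
  · simp only [List.mem_cons, List.not_mem_nil, or_false, not_or] at hk
    obtain ⟨h1, h2, h3, h4, h5, h6, h7, h8, h9, h10⟩ := hk
    have hi : pvMappedA.items =
        [ ("neural-cpu", "Ours+CPU"), ("neural-cuda", "Ours+CUDA")
        , ("ainv-cpu", "AINV+CPU"), ("ainv-cuda", "AINV+CUDA")
        , ("ic-cpu", "IC+CPU"), ("ic-cuda", "IC+CUDA")
        , ("diagonal-cpu", "Diag+CPU"), ("diagonal-cuda", "Diag+CUDA")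
        , ("none-cpu", "None+CPU"), ("none-cuda", "None+CUDA") ] := by decide
    have hA : pvMappedA.getD m m = m := by
      simp [PySem.Dict.getD, PySem.Dict.get?, hi, List.find?,
        beq_eq_false_iff_ne.mpr (Ne.symm h1), beq_eq_false_iff_ne.mpr (Ne.symm h2),
        beq_eq_false_iff_ne.mpr (Ne.symm h3), beq_eq_false_iff_ne.mpr (Ne.symm h4),
        beq_eq_false_iff_ne.mpr (Ne.symm h5), beq_eq_false_iff_ne.mpr (Ne.symm h6),
        beq_eq_false_iff_ne.mpr (Ne.symm h7), beq_eq_false_iff_ne.mpr (Ne.symm h8),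
        beq_eq_false_iff_ne.mpr (Ne.symm h9), beq_eq_false_iff_ne.mpr (Ne.symm h10)]
    rw [hA]
    unfold pvLabel
    cases hsp : pvRPartDash m.toList with
    | none => rfl
    | some ps =>
      obtain ⟨p, s⟩ := ps
      have hm : m.toList = p ++ '-' :: s := pvRPartDash_eq _ _ _ hsp
      cases ha : pvAlgoMap.get? (String.ofList p) with
      | none => simp [ha]
      | some a =>
        cases hd : pvDevMap.get? (String.ofList s) with
        | none => simp [ha, hd]
        | some d =>
          exfalso
          have hpl : p = "neural".toList ∨ p = "ainv".toList ∨ p = "ic".toList ∨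
              p = "diagonal".toList ∨ p = "none".toList := by
            rcases pvAlgo_key _ _ ha with h | h | h | h | h <;>
              [exact Or.inl ?_; exact Or.inr (Or.inl ?_); exact Or.inr (Or.inr (Or.inl ?_));
               exact Or.inr (Or.inr (Or.inr (Or.inl ?_)));
               exact Or.inr (Or.inr (Or.inr (Or.inr ?_)))] <;>
              (rw [← h]; simp)
          have hsl : s = "cpu".toList ∨ s = "cuda".toList := by
            rcases pvDev_key _ _ hd with h | h <;> [exact Or.inl ?_; exact Or.inr ?_] <;>
              (rw [← h]; simp)
          have hmm : m = String.ofList (p ++ '-' :: s) := by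
            rw [← hm]; exact String.ofList_toList.symm
          rcases hpl with rfl | rfl | rfl | rfl | rfl <;> rcases hsl with rfl | rfl <;>
            first
            | exact h1 (hmm.trans (by decide)) | exact h2 (hmm.trans (by decide))
            | exact h3 (hmm.trans (by decide)) | exact h4 (hmm.trans (by decide))
            | exact h5 (hmm.trans (by decide)) | exact h6 (hmm.trans (by decide))
            | exact h7 (hmm.trans (by decide)) | exact h8 (hmm.trans (by decide))
            | exact h9 (hmm.trans (by decide)) | exact h10 (hmm.trans (by decide))

-- ===== VERDICT (by name: the statement is the Claim_ definition above) =====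
theorem reinterprete_spec : Claim_equal_reinterprete := by
  intro method _
  unfold Spec_reinterprete reinterprete reinterprete_alt
  exact List.map_congr_left (fun m _ => pvLabel_eq m)
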